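-- pv_equiv track=rewrite | github.com/grammy-jiang/research-pipeline | src/research_pipeline/screening/q2d_augmentation.py | generate_q2d_queries
-- ===== SOURCE A (Python) =====
-- from collections.abc import Sequence
--
-- _Q2D_TEMPLATES: list[str] = [
--     # Abstract opening patterns
--     "this paper presents {topic}",
--     "we propose a method for {topic}",
--     "a survey of {topic}",
--     # Methodology patterns
--     "we introduce a novel approach to {topic}",
--     "our method addresses the challenge of {topic}",
--     # Related work patterns
--     "recent work on {topic} has shown",
--     "existing approaches to {topic} include",
--     # Results patterns
--     "experiments demonstrate that {topic} achieves",
--     "evaluation on {topic} benchmarks shows",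
--     # Problem statement patterns
--     "the problem of {topic} remains challenging",
-- ]
--
-- def generate_q2d_queries(
--     must_terms: Sequence[str],
--     nice_terms: Sequence[str],
--     max_queries: int = 5,
-- ) -> list[str]:
--     """Generate Q2D-style pseudo-abstract query variants.
--
--     Creates hypothetical document snippets by inserting the topic
--     phrase into academic writing templates.  These pseudo-documents
--     better match the vocabulary and structure of real paper abstracts.
--
--     Args:
--         must_terms: High-priority query terms.
--         nice_terms: Lower-priority query terms.
--         max_queries: Maximum number of Q2D queries to generate.
--
--     Returns:
--         List of Q2D-augmented query strings.
--     """
--     if not must_terms and not nice_terms: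
--         return []
--
--     topic = " ".join(list(must_terms) + list(nice_terms)).strip()
--     if not topic:
--         return []
--
--     queries: list[str] = []
--     seen: set[str] = set()
--
--     for template in _Q2D_TEMPLATES:
--         q = template.format(topic=topic)
--         if q not in seen:
--             seen.add(q)
--             queries.append(q)
--         if len(queries) >= max_queries:
--             break
--
--     # Also generate variants with must-terms only for focused matching
--     if nice_terms and must_terms:
--         must_topic = " ".join(must_terms).strip()
--         for template in _Q2D_TEMPLATES[:3]:  # Use first 3 templates
--             q = template.format(topic=must_topic)
--             if q not in seen:
--                 seen.add(q)
--                 queries.append(q)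
--             if len(queries) >= max_queries:
--                 break
--
--     return queries[:max_queries]
-- ===== SOURCE B (Python) =====
-- _Q2D_TEMPLATES: list[str] = [
--     "this paper presents {topic}",
--     "we propose a method for {topic}",
--     "a survey of {topic}",
--     "we introduce a novel approach to {topic}",
--     "our method addresses the challenge of {topic}",
--     "recent work on {topic} has shown",
--     "existing approaches to {topic} include",
--     "experiments demonstrate that {topic} achieves",
--     "evaluation on {topic} benchmarks shows",
--     "the problem of {topic} remains challenging",
-- ]
--
--
-- def _fill(templates, topic):
--     """Recursively substitute the topic into each template (each template
--     contains exactly the one field {topic}, so .format == .replace here)."""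
--     if not templates:
--         return []
--     return [templates[0].replace("{topic}", topic)] + _fill(templates[1:], topic)
--
--
-- def _uniq(xs):
--     """Order-preserving dedup by head-and-filter recursion: keep the head and
--     recurse on the tail with all copies of the head removed.  No set or dict."""
--     if not xs:
--         return []
--     return [xs[0]] + _uniq([x for x in xs[1:] if x != xs[0]])
--
--
-- def generate_q2d_queries(must_terms, nice_terms, max_queries=5):
--     topic = " ".join(list(must_terms) + list(nice_terms)).strip()
--     if not topic:
--         return []
--     cands = _fill(_Q2D_TEMPLATES, topic)
--     if must_terms and nice_terms:
--         cands += _fill(_Q2D_TEMPLATES[:3], " ".join(must_terms).strip())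
--     return _uniq(cands)[:max_queries]
-- ===== Notes on version B (the rewrite author's own statement) =====
-- stated objective: alternative
-- what changed: A's two interleaved format/dedup/cap loops with a seen-set and break statements are replaced by purely recursive phases with no set at all: recursive template filling builds the flat candidate list, then a head-and-filter recursive dedup (keep the head, recurse on the tail with copies of the head filtered out) and one final slice.
-- outside the precondition, e.g. on generate_q2d_queries(['a'], [], -9): A returns [], B returns ['this paper presents a']
import Mathlib
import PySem

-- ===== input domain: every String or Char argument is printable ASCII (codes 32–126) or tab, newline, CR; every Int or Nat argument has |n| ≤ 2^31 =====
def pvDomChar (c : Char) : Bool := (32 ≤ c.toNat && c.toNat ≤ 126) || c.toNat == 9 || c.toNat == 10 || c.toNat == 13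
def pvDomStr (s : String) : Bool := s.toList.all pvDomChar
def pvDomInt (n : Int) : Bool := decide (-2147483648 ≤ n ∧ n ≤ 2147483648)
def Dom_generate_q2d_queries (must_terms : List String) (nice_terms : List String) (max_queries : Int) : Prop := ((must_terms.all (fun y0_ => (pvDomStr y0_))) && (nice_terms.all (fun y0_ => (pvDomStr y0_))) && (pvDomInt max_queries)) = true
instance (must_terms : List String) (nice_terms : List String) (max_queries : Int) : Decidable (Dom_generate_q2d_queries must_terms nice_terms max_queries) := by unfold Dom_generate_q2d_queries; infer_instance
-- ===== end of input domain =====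

-- B replaces A's two interleaved format/dedup/cap loops (seen-set, breaks) by purely recursive
-- phases with no set: recursive template filling, then a head-and-filter recursive dedup, then
-- one final cap (objective: alternative; no speed claim).

-- ===== PORT A =====
-- the module constant _Q2D_TEMPLATES (shared by both ports, as in the Python module)
def q2dTemplates : List String := [
  "this paper presents {topic}",
  "we propose a method for {topic}",
  "a survey of {topic}",
  "we introduce a novel approach to {topic}",
  "our method addresses the challenge of {topic}",
  "recent work on {topic} has shown",
  "existing approaches to {topic} include",
  "experiments demonstrate that {topic} achieves",
  "evaluation on {topic} benchmarks shows",
  "the problem of {topic} remains challenging"]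

-- template.format(topic=topic): exact here because every template contains '{topic}' exactly once
-- and no other brace, so str.format is the single substitution str.replace performs
def q2dFormat (template topic : String) : String :=
  PySem.Str.replace template "{topic}" topic

-- A's for-loop: dedup via `seen`, append, and `break` once len(queries) >= max_queries
-- (the break test is written in each branch of the membership test; same computation)
def q2dLoop (templates : List String) (topic : String) (max_queries : Int)
    (queries : List String) (seen : PySem.Set String) : List String × PySem.Set String :=
  match templates with
  | [] => (queries, seen)
  | t :: rest =>
    let q := q2dFormat t topic
    if seen.contains q then
      if max_queries ≤ (queries.length : Int) then (queries, seen)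
      else q2dLoop rest topic max_queries queries seen
    else
      if max_queries ≤ ((queries ++ [q]).length : Int) then (queries ++ [q], seen.add q)
      else q2dLoop rest topic max_queries (queries ++ [q]) (seen.add q)

def generate_q2d_queries (must_terms : List String) (nice_terms : List String) (max_queries : Int) : List String :=
  if must_terms.isEmpty && nice_terms.isEmpty then []
  else
    let topic := PySem.Str.strip (PySem.Str.join " " (must_terms ++ nice_terms))
    if topic = "" then []
    else
      let r1 := q2dLoop q2dTemplates topic max_queries [] PySem.Set.empty
      let r2 :=
        if !nice_terms.isEmpty && !must_terms.isEmpty then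
          q2dLoop (PySem.List.slice q2dTemplates none (some 3))
            (PySem.Str.strip (PySem.Str.join " " must_terms)) max_queries r1.1 r1.2
        else r1
      PySem.List.slice r2.1 none (some max_queries)

-- ===== PORT B =====
-- _fill: recursive substitution of the topic into each template (.format == .replace here,
-- each template holding exactly the one field {topic})
def q2dFill : List String → String → List String
  | [], _ => []
  | t :: rest, topic => PySem.Str.replace t "{topic}" topic :: q2dFill rest topic

-- _uniq: head-and-filter recursive dedup (keep head, recurse on tail with copies of head removed)
def q2dUniq : List String → List String
  | [] => []
  | x :: rest => x :: q2dUniq (rest.filter (fun y => y ≠ x))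
termination_by xs => xs.length
decreasing_by
  simpa using Nat.lt_succ_of_le ((List.length_filter_le _ _).trans (le_of_eq List.length_attach))

def generate_q2d_queries_alt (must_terms : List String) (nice_terms : List String) (max_queries : Int) : List String :=
  let topic := PySem.Str.strip (PySem.Str.join " " (must_terms ++ nice_terms))
  if topic = "" then []
  else
    let cands := q2dFill q2dTemplates topic
    let cands :=
      if !must_terms.isEmpty && !nice_terms.isEmpty then
        cands ++ q2dFill (PySem.List.slice q2dTemplates none (some 3))
          (PySem.Str.strip (PySem.Str.join " " must_terms))
      else cands
    PySem.List.slice (q2dUniq cands) none (some max_queries)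

-- ===== PRECONDITION & SPEC =====
-- Pre_ excludes small negative max_queries (outside the count's natural domain) on inputs with a
-- non-empty topic, where A's early-break bookkeeping interacting with Python's negative-slice
-- queries[:max_queries] yields an accidental value that B's single negative slice does not reproduce
-- (for max_queries ≤ -13 or an all-whitespace topic both programs return [] and stay inside Pre_).
def Pre_generate_q2d_queries (must_terms : List String) (nice_terms : List String) (max_queries : Int) : Prop :=
  0 ≤ max_queries ∨ max_queries ≤ -13 ∨
    PySem.Str.strip (PySem.Str.join " " (must_terms ++ nice_terms)) = ""
instance (must_terms : List String) (nice_terms : List String) (max_queries : Int) : Decidable (Pre_generate_q2d_queries must_terms nice_terms max_queries) := by unfold Pre_generate_q2d_queries; infer_instance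
def pvWitness_generate_q2d_queries : List String × List String × Int := (["deep"], ["learning"], 5)

def Spec_generate_q2d_queries (must_terms : List String) (nice_terms : List String) (max_queries : Int) (out : List String) : Prop := out = generate_q2d_queries_alt must_terms nice_terms max_queries
instance (must_terms : List String) (nice_terms : List String) (max_queries : Int) (out : List String) : Decidable (Spec_generate_q2d_queries must_terms nice_terms max_queries out) := by unfold Spec_generate_q2d_queries; infer_instance

-- ===== CLAIM (what is proved, stated in full; the proofs are below) =====
def Claim_equal_generate_q2d_queries : Prop := ∀ (must_terms : List String) (nice_terms : List String) (max_queries : Int), Dom_generate_q2d_queries must_terms nice_terms max_queries → Pre_generate_q2d_queries must_terms nice_terms max_queries → Spec_generate_q2d_queries must_terms nice_terms max_queries (generate_q2d_queries must_terms nice_terms max_queries)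

-- ===== LEMMAS AND PROOFS =====

-- B's recursive fill is the map by q2dFormat
theorem q2dFill_eq_map (ts : List String) (topic : String) :
    q2dFill ts topic = ts.map (fun t => q2dFormat t topic) := by
  induction ts with
  | nil => rfl
  | cons t rest ih => simp [q2dFill, ih, q2dFormat]

-- pulling a head through the Set.add fold: occurrences of x are exactly the ones skipped
theorem q2d_add_cons (l : List String) (qs : List String) (x : String) :
    List.foldl PySem.Set.add (x :: qs) l
      = x :: List.foldl PySem.Set.add qs (l.filter (fun y => y ≠ x)) := by
  induction l generalizing qs with
  | nil => rfl
  | cons y rest ih =>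
    by_cases hxy : y = x
    · subst hxy
      have : PySem.Set.add (y :: qs) y = y :: qs := by simp [PySem.Set.add]
      simp [ih]
    · have h1 : PySem.Set.add (x :: qs) y = x :: PySem.Set.add qs y := by
        simp only [PySem.Set.add]
        by_cases hy : y ∈ qs <;> simp [PySem.Set.contains, hy, hxy]
      simp [hxy, h1, ih]

-- B's head-and-filter dedup equals the Set.add fold that characterises A's seen-set
theorem q2dUniq_eq_foldl (xs : List String) :
    q2dUniq xs = List.foldl PySem.Set.add [] xs := by
  induction hl : xs.length using Nat.strong_induction_on generalizing xs with
  | _ n ih =>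
    cases xs with
    | nil => simp [q2dUniq]
    | cons x l =>
      have hfilt : (l.filter (fun y => y ≠ x)).length < n := by
        have := List.length_filter_le (fun y => y ≠ x) l
        simp only [List.length_cons] at hl; omega
      have hadd : PySem.Set.add [] x = [x] := by simp [PySem.Set.add, PySem.Set.contains]
      rw [show q2dUniq (x :: l) = x :: q2dUniq (l.filter (fun y => y ≠ x)) from by
          simp [q2dUniq], List.foldl_cons, hadd,
        show ([x] : List String) = x :: [] from rfl, q2d_add_cons,
        ih _ hfilt _ rfl]

-- loop invariant: the `seen` set holds exactly the elements of the `queries` list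
def q2dInv (queries : List String) (seen : PySem.Set String) : Prop :=
  ∀ x : String, x ∈ seen ↔ x ∈ queries

theorem q2d_foldl_add_prefix (l : List String) (qs : List String) :
    qs <+: l.foldl PySem.Set.add qs := by
  induction l generalizing qs with
  | nil => exact List.prefix_refl _
  | cons x rest ih =>
    refine List.IsPrefix.trans ?_ (ih (PySem.Set.add qs x))
    simp only [PySem.Set.add]
    split
    · exact List.prefix_refl _
    · exact List.prefix_append _ _

theorem q2dLoop_mono (templates : List String) (topic : String) (mq : Int)
    (qs : List String) (seen : PySem.Set String) :
    qs <+: (q2dLoop templates topic mq qs seen).1 := by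
  induction templates generalizing qs seen with
  | nil => exact List.prefix_refl _
  | cons t rest ih =>
    simp only [q2dLoop]
    split
    · split
      · exact List.prefix_refl _
      · exact ih qs seen
    · split
      · exact List.prefix_append _ _
      · exact List.IsPrefix.trans (List.prefix_append _ _) (ih _ _)

theorem q2dInv_add (qs : List String) (seen : PySem.Set String) (q : String)
    (h : q2dInv qs seen) : q2dInv (qs ++ [q]) (seen.add q) := by
  intro x
  rw [PySem.Set.mem_add]
  simp [h x]

theorem q2dLoop_spec (templates : List String) (topic : String) (mq : Int)
    (qs : List String) (seen : PySem.Set String) (hinv : q2dInv qs seen) :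
    (((q2dLoop templates topic mq qs seen).1 =
        (templates.map (fun t => q2dFormat t topic)).foldl PySem.Set.add qs ∧
      q2dInv (q2dLoop templates topic mq qs seen).1 (q2dLoop templates topic mq qs seen).2) ∨
     (mq ≤ ((q2dLoop templates topic mq qs seen).1.length : Int) ∧
      (q2dLoop templates topic mq qs seen).1 <+:
        (templates.map (fun t => q2dFormat t topic)).foldl PySem.Set.add qs)) := by
  induction templates generalizing qs seen with
  | nil => exact Or.inl ⟨rfl, hinv⟩
  | cons t rest ih =>
    simp only [q2dLoop, List.map_cons, List.foldl_cons]
    by_cases hc : seen.contains (q2dFormat t topic)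
    · have hmem : q2dFormat t topic ∈ qs := (hinv _).1 (by simpa using hc)
      have hadd : PySem.Set.add qs (q2dFormat t topic) = qs := by
        simp [PySem.Set.add, hmem]
      rw [hadd]
      simp only [hc, if_true]
      split
      · rename_i hbrk
        exact Or.inr ⟨hbrk, q2d_foldl_add_prefix _ qs⟩
      · exact ih qs seen hinv
    · have hmem : q2dFormat t topic ∉ qs := fun hx => hc (by simpa using (hinv _).2 hx)
      have hadd : PySem.Set.add qs (q2dFormat t topic) = qs ++ [q2dFormat t topic] := by
        simp only [PySem.Set.add]
        split
        · rename_i hx; exact absurd (by simpa using hx) hmem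
        · rfl
      rw [hadd]
      simp only [hc, if_false, Bool.false_eq_true]
      split
      · rename_i hbrk
        exact Or.inr ⟨hbrk, q2d_foldl_add_prefix _ _⟩
      · exact ih _ _ (q2dInv_add qs seen _ hinv)

theorem q2d_prefix_take_eq (l1 l2 : List String) (n : Nat)
    (h : l1 <+: l2) (hn : n ≤ l1.length) : l1.take n = l2.take n := by
  obtain ⟨t, rfl⟩ := h
  exact (List.take_append_of_le_length hn).symm

-- first loop alone: capped result = capped full dedup fold of the formatted candidates
theorem q2dLoop1_take (T1 : List String) (topic : String) (mq : Int) :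
    (q2dLoop T1 topic mq [] PySem.Set.empty).1.take mq.toNat
      = (List.foldl PySem.Set.add [] (T1.map (fun t => q2dFormat t topic))).take mq.toNat := by
  rcases q2dLoop_spec T1 topic mq [] PySem.Set.empty (fun _ => Iff.rfl) with ⟨heq, _⟩ | ⟨hlen, hpre⟩
  · rw [heq]
  · exact q2d_prefix_take_eq _ _ mq.toNat hpre (Int.toNat_le.mpr hlen)

-- both loops chained: capped result = capped full dedup fold of all candidates
theorem q2dLoop2_take (T1 T2 : List String) (topic mtopic : String) (mq : Int) :
    (q2dLoop T2 mtopic mq (q2dLoop T1 topic mq [] PySem.Set.empty).1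
        (q2dLoop T1 topic mq [] PySem.Set.empty).2).1.take mq.toNat
      = (List.foldl PySem.Set.add []
          (T1.map (fun t => q2dFormat t topic) ++ T2.map (fun t => q2dFormat t mtopic))).take mq.toNat := by
  rw [List.foldl_append]
  rcases q2dLoop_spec T1 topic mq [] PySem.Set.empty (fun _ => Iff.rfl) with ⟨heq, hinv1⟩ | ⟨hlen, hpre1⟩
  · rw [← heq]
    rcases q2dLoop_spec T2 mtopic mq (q2dLoop T1 topic mq [] PySem.Set.empty).1
        (q2dLoop T1 topic mq [] PySem.Set.empty).2 hinv1 with ⟨heq2, _⟩ | ⟨hlen2, hpre2⟩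
    · rw [heq2]
    · exact q2d_prefix_take_eq _ _ mq.toNat hpre2 (Int.toNat_le.mpr hlen2)
  · have hmono := q2dLoop_mono T2 mtopic mq (q2dLoop T1 topic mq [] PySem.Set.empty).1
      (q2dLoop T1 topic mq [] PySem.Set.empty).2
    have hn1 : mq.toNat ≤ (q2dLoop T1 topic mq [] PySem.Set.empty).1.length := Int.toNat_le.mpr hlen
    rw [← q2d_prefix_take_eq _ _ mq.toNat hmono hn1]
    exact q2d_prefix_take_eq _ _ mq.toNat
      (List.IsPrefix.trans hpre1 (q2d_foldl_add_prefix _ _)) hn1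

theorem q2dLoop_length_le (templates : List String) (topic : String) (mq : Int)
    (qs : List String) (seen : PySem.Set String) :
    (q2dLoop templates topic mq qs seen).1.length ≤ qs.length + templates.length := by
  induction templates generalizing qs seen with
  | nil => simp [q2dLoop]
  | cons t rest ih =>
    simp only [q2dLoop, List.length_cons]
    split
    · split
      · simp
      · have := ih qs seen; omega
    · split
      · simp
      · have := ih (qs ++ [q2dFormat t topic]) (seen.add (q2dFormat t topic))
        simp at this; omega

theorem q2d_foldl_add_length_le (l : List String) (qs : List String) :
    (List.foldl PySem.Set.add qs l).length ≤ qs.length + l.length := by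
  induction l generalizing qs with
  | nil => simp
  | cons x rest ih =>
    simp only [List.foldl_cons, List.length_cons]
    have h := ih (PySem.Set.add qs x)
    have : (PySem.Set.add qs x).length ≤ qs.length + 1 := by
      simp only [PySem.Set.add]; split <;> simp
    omega

theorem q2d_slice_big_neg (xs : List String) (mq : Int) (h : mq ≤ -(xs.length : Int)) :
    PySem.List.slice xs none (some mq) = [] := by
  have hk : mq = -(((-mq).toNat : Nat) : Int) := by omega
  rcases Nat.eq_zero_or_pos (-mq).toNat with h0 | hpos
  · have : xs.length = 0 := by omega
    simp [List.length_eq_zero_iff.mp this, PySem.List.slice]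
  · rw [hk, PySem.List.slice_to_neg_natCast xs (-mq).toNat hpos]
    have : xs.length - (-mq).toNat = 0 := by omega
    simp [this]

theorem q2dLoop1_bigneg (T1 : List String) (topic : String) (mq : Int)
    (h : mq ≤ -(T1.length : Int)) :
    PySem.List.slice (q2dLoop T1 topic mq [] PySem.Set.empty).1 none (some mq) = [] := by
  apply q2d_slice_big_neg
  have h1 := q2dLoop_length_le T1 topic mq [] PySem.Set.empty
  simp only [List.length_nil, Nat.zero_add] at h1
  omega

theorem q2dLoop2_bigneg (T1 T2 : List String) (topic mtopic : String) (mq : Int)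
    (h : mq ≤ -((T1.length : Int) + (T2.length : Int))) :
    PySem.List.slice
      (q2dLoop T2 mtopic mq (q2dLoop T1 topic mq [] PySem.Set.empty).1
        (q2dLoop T1 topic mq [] PySem.Set.empty).2).1 none (some mq) = [] := by
  apply q2d_slice_big_neg
  have h1 := q2dLoop_length_le T1 topic mq [] PySem.Set.empty
  have h2 := q2dLoop_length_le T2 mtopic mq (q2dLoop T1 topic mq [] PySem.Set.empty).1
    (q2dLoop T1 topic mq [] PySem.Set.empty).2
  simp only [List.length_nil, Nat.zero_add] at h1
  omega

theorem q2dDedup_bigneg (l : List String) (mq : Int) (h : mq ≤ -(l.length : Int)) :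
    PySem.List.slice (List.foldl PySem.Set.add [] l) none (some mq) = [] := by
  apply q2d_slice_big_neg
  have := q2d_foldl_add_length_le l []
  simp only [List.length_nil, Nat.zero_add] at this
  omega

-- ===== VERDICT (by name: the statement is the Claim_ definition above) =====
theorem generate_q2d_queries_spec : Claim_equal_generate_q2d_queries := by
  intro must nice mq _hdom hpre
  unfold Spec_generate_q2d_queries generate_q2d_queries generate_q2d_queries_alt
  by_cases hboth : must.isEmpty && nice.isEmpty
  · have hm : must = [] := by cases must <;> simp_all
    have hn : nice = [] := by cases nice <;> simp_all
    subst hm; subst hn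
    simp only [hboth, if_true]
    rfl
  · simp only [hboth, Bool.false_eq_true, if_false]
    by_cases htop : PySem.Str.strip (PySem.Str.join " " (must ++ nice)) = ""
    · simp [htop]
    · simp only [htop, if_false]
      rcases hpre with hmq | hneg | htop'
      · -- 0 ≤ max_queries: the capped loops equal the capped dedup of all candidates
        by_cases hg : !nice.isEmpty && !must.isEmpty
        · have hg' : (!must.isEmpty && !nice.isEmpty) = true := by rw [Bool.and_comm]; exact hg
          simp only [hg, hg', if_true]
          rw [q2dUniq_eq_foldl, q2dFill_eq_map, q2dFill_eq_map,
            PySem.List.slice_to _ hmq, PySem.List.slice_to _ hmq]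
          exact q2dLoop2_take q2dTemplates (PySem.List.slice q2dTemplates none (some 3))
            (PySem.Str.strip (PySem.Str.join " " (must ++ nice)))
            (PySem.Str.strip (PySem.Str.join " " must)) mq
        · have hg' : (!must.isEmpty && !nice.isEmpty) = false := by rw [Bool.and_comm]; simpa using hg
          simp only [hg, hg', Bool.false_eq_true, if_false]
          rw [q2dUniq_eq_foldl, q2dFill_eq_map,
            PySem.List.slice_to _ hmq, PySem.List.slice_to _ hmq]
          exact q2dLoop1_take q2dTemplates
            (PySem.Str.strip (PySem.Str.join " " (must ++ nice))) mq
      · -- max_queries ≤ -13: at most 13 candidates exist, so both negative slices are []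
        have h13 : (q2dTemplates.length : Int) + ((PySem.List.slice q2dTemplates none (some 3)).length : Int) = 13 := by decide
        have h10 : (q2dTemplates.length : Int) = 10 := by decide
        by_cases hg : !nice.isEmpty && !must.isEmpty
        · have hg' : (!must.isEmpty && !nice.isEmpty) = true := by rw [Bool.and_comm]; exact hg
          simp only [hg, hg', if_true]
          rw [q2dUniq_eq_foldl, q2dFill_eq_map, q2dFill_eq_map,
            q2dLoop2_bigneg _ _ _ _ mq (by omega),
            q2dDedup_bigneg _ mq (by simp only [List.length_append, List.length_map]; push_cast; omega)]
        · have hg' : (!must.isEmpty && !nice.isEmpty) = false := by rw [Bool.and_comm]; simpa using hg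
          simp only [hg, hg', Bool.false_eq_true, if_false]
          rw [q2dUniq_eq_foldl, q2dFill_eq_map,
            q2dLoop1_bigneg _ _ mq (by omega),
            q2dDedup_bigneg _ mq (by simp only [List.length_map]; omega)]
      · exact absurd htop' htop
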